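-- pv_equiv track=rewrite | github.com/VinayakPorwal/TCS_NQT | numbers/replace_0's_with_1.py | func
-- ===== SOURCE A (Python) =====
-- def func(n):
--     ans = 0
--     while(n>0):
--         mod = n%10
--         if mod==0:
--             mod =1
--         ans = ans*10 + mod
--         n=n//10
--     return ans
-- ===== SOURCE B (Python) =====
-- def func(n):
--     # Reverse the decimal digits of n, turning every 0 digit into 1.
--     # For n <= 0 the original's loop never runs, so the result is 0.
--     if n <= 0:
--         return 0
--     return sum(((ord(c) - 48) or 1) * 10 ** i for i, c in enumerate(str(n)))
-- ===== Notes on version B (the rewrite author's own statement) =====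
-- stated objective: alternative
-- what changed: B walks the decimal string of n most-significant-digit first, weighting each (zero-fixed) digit by a power of ten, instead of A's arithmetic extraction of digits with % and // and an accumulator multiplied by 10.
import Mathlib
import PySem

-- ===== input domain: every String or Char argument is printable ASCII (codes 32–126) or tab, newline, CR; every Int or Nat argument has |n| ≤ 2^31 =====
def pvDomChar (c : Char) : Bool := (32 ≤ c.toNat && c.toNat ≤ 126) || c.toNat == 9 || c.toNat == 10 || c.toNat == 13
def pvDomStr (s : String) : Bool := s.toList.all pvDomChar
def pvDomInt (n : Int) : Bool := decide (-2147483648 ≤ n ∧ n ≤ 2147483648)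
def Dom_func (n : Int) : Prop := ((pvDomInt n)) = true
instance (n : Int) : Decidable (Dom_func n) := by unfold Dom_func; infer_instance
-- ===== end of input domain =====

-- B re-implements the digit-reverse-with-zero-fix by walking the decimal string of n
-- most-significant-digit first with powers of ten (objective: alternative algorithm).


-- ===== PORT A =====
-- while n > 0: mod = n % 10; if mod == 0: mod = 1; ans = ans*10 + mod; n = n // 10
def funcGo (n ans : Int) : Int :=
  if 0 < n then
    funcGo (PySem.Int.floordiv n 10)
      (ans * 10 + (if PySem.Int.mod n 10 = 0 then 1 else PySem.Int.mod n 10))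
  else ans
termination_by n.toNat
decreasing_by
  rw [PySem.Int.floordiv_eq_ediv_of_pos (by norm_num)]
  omega

def func (n : Int) : Int := funcGo n 0

-- ===== PORT B =====
-- if n <= 0: return 0
-- return sum(((ord(c) - 48) or 1) * 10 ** i for i, c in enumerate(str(n)))
-- (the index i from enumerate is ≥ 0, so Python's 10 ** i is 10 ^ i.toNat)
def func_alt (n : Int) : Int :=
  if n ≤ 0 then 0
  else
    ((PySem.List.enumerate (PySem.Int.toChars n) 0).map
      (fun p => (if ((p.2.toNat : Int) - 48) = 0 then 1 else ((p.2.toNat : Int) - 48))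
                  * 10 ^ p.1.toNat)).sum

-- ===== PRECONDITION & SPEC =====
def Spec_func (n : Int) (out : Int) : Prop := out = func_alt n
instance (n : Int) (out : Int) : Decidable (Spec_func n out) := by unfold Spec_func; infer_instance

-- ===== CLAIM (what is proved, stated in full; the proofs are below) =====
def Claim_equal_func : Prop := ∀ (n : Int), Dom_func n → Spec_func n (func n)

-- ===== LEMMAS AND PROOFS =====

-- Spec recursion for the decimal digit characters of a Nat (matches Nat.toDigits 10).
def pvDigits (m : Nat) : List Char :=
  if m < 10 then [Nat.digitChar m] else pvDigits (m / 10) ++ [Nat.digitChar (m % 10)]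
termination_by m
decreasing_by omega

lemma pv_toDigitsCore_eq (f : Nat) : ∀ (m : Nat) (ds : List Char), m < f →
    Nat.toDigitsCore 10 f m ds = pvDigits m ++ ds := by
  induction f with
  | zero => intro m ds h; omega
  | succ f ih =>
    intro m ds h
    rw [Nat.toDigitsCore]
    by_cases h10 : m < 10
    · have : m / 10 = 0 := by omega
      rw [this]
      rw [pvDigits, if_pos h10, Nat.mod_eq_of_lt h10]
      rfl
    · have hne : ¬ m / 10 = 0 := by omega
      rw [if_neg hne, ih (m / 10) _ (by omega)]
      conv_rhs => rw [pvDigits, if_neg h10]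
      rw [List.append_assoc]
      rfl

lemma pv_toDigits_eq (m : Nat) : Nat.toDigits 10 m = pvDigits m := by
  rw [Nat.toDigits, pv_toDigitsCore_eq (m + 1) m [] (by omega), List.append_nil]

lemma pv_digitChar_toNat (d : Nat) (h : d < 10) : (Nat.digitChar d).toNat = 48 + d := by
  interval_cases d <;> decide

-- The B-side weighted digit sum, abstracted over the char list.
def pvSum (ds : List Char) : Int :=
  ((PySem.List.enumerate ds 0).map
    (fun p => (if ((p.2.toNat : Int) - 48) = 0 then 1 else ((p.2.toNat : Int) - 48))
                * 10 ^ p.1.toNat)).sum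

lemma pvSum_append_singleton (ds : List Char) (c : Char) :
    pvSum (ds ++ [c]) = pvSum ds
      + (if ((c.toNat : Int) - 48) = 0 then 1 else ((c.toNat : Int) - 48)) * 10 ^ ds.length := by
  unfold pvSum
  rw [PySem.List.enumerate_append, List.map_append, List.sum_append]
  congr 1
  rw [PySem.List.enumerate_cons, PySem.List.enumerate_nil]
  simp

lemma pv_go_eq (m : Nat) : 0 < m → ∀ acc : Int,
    funcGo (m : Int) acc = acc * 10 ^ (pvDigits m).length + pvSum (pvDigits m) := by
  induction m using Nat.strong_induction_on with
  | _ m ih =>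
    intro hm acc
    have h10 : (10 : Int) = ((10 : Nat) : Int) := by norm_num
    rw [funcGo, if_pos (by exact_mod_cast hm)]
    rw [h10, PySem.Int.floordiv_natCast, PySem.Int.mod_natCast]
    by_cases hlt : m < 10
    · have hdiv : m / 10 = 0 := by omega
      have hmod : m % 10 = m := Nat.mod_eq_of_lt hlt
      rw [hdiv, hmod]
      rw [funcGo, if_neg (by norm_num)]
      rw [pvDigits, if_pos hlt]
      have : pvSum [Nat.digitChar m] =
          (if ((m : Nat) : Int) = 0 then 1 else ((m : Nat) : Int)) := by
        unfold pvSum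
        rw [PySem.List.enumerate_cons, PySem.List.enumerate_nil]
        simp [pv_digitChar_toNat m hlt]
      rw [this]
      norm_num
    · have hpos : 0 < m / 10 := by omega
      rw [ih (m / 10) (by omega) hpos]
      conv_rhs => rw [pvDigits, if_neg hlt]
      rw [pvSum_append_singleton, List.length_append]
      have hc : ((Nat.digitChar (m % 10)).toNat : Int) - 48 = ((m % 10 : Nat) : Int) := by
        rw [pv_digitChar_toNat (m % 10) (by omega)]
        push_cast
        ring
      rw [hc]
      simp only [List.length_singleton]
      ring

-- ===== VERDICT (by name: the statement is the Claim_ definition above) =====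
theorem func_spec : Claim_equal_func := by
  unfold Claim_equal_func
  intro n _
  unfold Spec_func func func_alt
  by_cases hn : n ≤ 0
  · rw [if_pos hn, funcGo, if_neg (by omega)]
  · rw [if_neg hn]
    have hpos : 0 < n := by omega
    have hm : ((n.toNat : Nat) : Int) = n := Int.toNat_of_nonneg (by omega)
    have htc : PySem.Int.toChars n = pvDigits n.toNat := by
      rw [PySem.Int.toChars, if_neg (by omega), pv_toDigits_eq]
    conv_lhs => rw [← hm]
    rw [pv_go_eq n.toNat (by omega) 0, htc]
    simp [pvSum]
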